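-- pv_equiv track=rewrite | github.com/vrvs/API | untagged/ranker/ranking.py | matrixDist
-- ===== SOURCE A (Python) =====
-- def removeDuplicates(query):
--     result = []
--     for q in query:
--        if q not in result:
--            result.append(q)
--     return result
--
-- def minDist(term1, term2, invertedFile):
--     if len(invertedFile.get(term1,[])) == 0:
--         return 15000
--     if len(invertedFile.get(term2,[])) == 0:
--         return 15000
--     minValue = 15000
--     list1 = invertedFile.get(term1)
--     list2 = invertedFile.get(term2)
--     l1 = range(0,len(list1))
--     l2 = range(0,len(list2))
--     for i in l1:
--         for j in l2:
--             if(list1[i]<list2[j]):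
--                 if(list2[j]-(list1[i]+len(term1))<minValue):
--                     minValue = list2[j]-(list1[i]+len(term1))
--             else:
--                 if(list1[i]-(list2[j]+len(term2))<minValue):
--                     minValue = list1[i]-(list2[j]+len(term2))
--     return minValue
--
-- def matrixDist(query, invertedFile):
--     query = removeDuplicates(query)
--     matrix = [[0 for x in range(len(query))] for y in range(len(query))]
--     l1 = range(0,len(query))
--     for i in l1:
--         for j in l1:
--             if i!=j:
--                 matrix[i][j] = minDist(query[i],query[j],invertedFile)
--     return matrix
-- ===== SOURCE B (Python) =====
-- def _mergeMin(p1, p2, c1, c2):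
--     best = 15000
--     i = 0
--     j = 0
--     n1 = len(p1)
--     n2 = len(p2)
--     while i < n1 and j < n2:
--         a = p1[i]
--         b = p2[j]
--         if a < b:
--             d = b - a - c1
--             i += 1
--         else:
--             d = a - b - c2
--             j += 1
--         if d < best:
--             best = d
--     return best
--
-- def matrixDist(query, invertedFile):
--     terms = list(dict.fromkeys(query))
--     k = len(terms)
--     pos = [sorted(invertedFile.get(t, [])) for t in terms]
--     lens = [len(t) for t in terms]
--     ne = [i for i in range(k) if pos[i]]
--     matrix = []
--     for i in range(k):
--         row = [15000] * k
--         row[i] = 0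
--         if pos[i]:
--             pi = pos[i]
--             ci = lens[i]
--             for j in ne:
--                 if j != i:
--                     row[j] = _mergeMin(pi, pos[j], ci, lens[j])
--         matrix.append(row)
--     return matrix
-- ===== Notes on version B (the rewrite author's own statement) =====
-- stated objective: faster
-- what changed: Per matrix cell A scans all n*m position pairs; B sorts each term's positions once, precomputes which terms have positions, fills each row with the 15000 sentinel in one step and runs a linear two-pointer merge only for pairs of terms that both occur, after O(n) dict.fromkeys dedup instead of A's quadratic membership-list dedup.
import Mathlib
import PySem

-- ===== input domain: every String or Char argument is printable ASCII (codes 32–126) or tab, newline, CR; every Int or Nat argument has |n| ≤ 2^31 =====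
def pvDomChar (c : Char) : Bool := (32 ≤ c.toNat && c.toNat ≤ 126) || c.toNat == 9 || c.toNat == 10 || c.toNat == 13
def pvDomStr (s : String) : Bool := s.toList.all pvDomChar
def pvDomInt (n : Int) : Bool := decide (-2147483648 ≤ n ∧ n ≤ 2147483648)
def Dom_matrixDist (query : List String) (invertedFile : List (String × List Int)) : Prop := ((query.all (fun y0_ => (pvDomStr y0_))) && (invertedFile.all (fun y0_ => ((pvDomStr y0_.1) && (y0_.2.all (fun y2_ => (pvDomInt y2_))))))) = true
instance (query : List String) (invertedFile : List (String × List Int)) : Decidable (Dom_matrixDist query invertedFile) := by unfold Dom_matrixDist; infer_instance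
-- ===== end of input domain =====

-- B replaces A's all-pairs position scan per matrix cell by sort + two-pointer merge and
-- builds the matrix directly instead of mutating a zero matrix; objective: faster.

-- ===== PORT A =====
def removeDuplicates (query : List String) : List String :=
  query.foldl (fun result q => if q ∈ result then result else result ++ [q]) []

def minDist (term1 term2 : String) (invertedFile : List (String × List Int)) : Int :=
  if (PySem.Dict.getD ⟨invertedFile⟩ term1 ([] : List Int)).length = 0 then 15000
  else if (PySem.Dict.getD ⟨invertedFile⟩ term2 ([] : List Int)).length = 0 then 15000
  else
    -- invertedFile.get(termN) without a default: the guards above already returned when the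
    -- key is missing (get(termN,[]) = []), so here it equals get with default [] — exact.
    let list1 := PySem.Dict.getD ⟨invertedFile⟩ term1 ([] : List Int)
    let list2 := PySem.Dict.getD ⟨invertedFile⟩ term2 ([] : List Int)
    let l1 := PySem.List.pyRange 0 (list1.length : Int)
    let l2 := PySem.List.pyRange 0 (list2.length : Int)
    l1.foldl (fun minValue i =>
      l2.foldl (fun minValue j =>
        if PySem.List.pyGetD list1 i 0 < PySem.List.pyGetD list2 j 0 then
          if PySem.List.pyGetD list2 j 0 - (PySem.List.pyGetD list1 i 0 + PySem.Str.len term1) < minValue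
          then PySem.List.pyGetD list2 j 0 - (PySem.List.pyGetD list1 i 0 + PySem.Str.len term1)
          else minValue
        else
          if PySem.List.pyGetD list1 i 0 - (PySem.List.pyGetD list2 j 0 + PySem.Str.len term2) < minValue
          then PySem.List.pyGetD list1 i 0 - (PySem.List.pyGetD list2 j 0 + PySem.Str.len term2)
          else minValue) minValue) 15000

def matrixDist (query : List String) (invertedFile : List (String × List Int)) : List (List Int) :=
  let q := removeDuplicates query
  let matrix := (PySem.List.pyRange 0 (q.length : Int)).map
      (fun _ => (PySem.List.pyRange 0 (q.length : Int)).map (fun _ => (0 : Int)))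
  let l1 := PySem.List.pyRange 0 (q.length : Int)
  l1.foldl (fun matrix i =>
    l1.foldl (fun matrix j =>
      if i ≠ j then
        PySem.List.pySetD matrix i
          (PySem.List.pySetD (PySem.List.pyGetD matrix i []) j
            (minDist (PySem.List.pyGetD q i "") (PySem.List.pyGetD q j "") invertedFile))
      else matrix) matrix) matrix

-- ===== PORT B =====
def tpLoop (p1 p2 : List Int) (c1 c2 best : Int) : Int :=
  match p1, p2 with
  | a :: as, b :: bs =>
    if a < b then
      tpLoop as (b :: bs) c1 c2 (if b - a - c1 < best then b - a - c1 else best)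
    else
      tpLoop (a :: as) bs c1 c2 (if a - b - c2 < best then a - b - c2 else best)
  | _, _ => best
termination_by p1.length + p2.length
decreasing_by all_goals simp

def matrixDist_alt (query : List String) (invertedFile : List (String × List Int)) : List (List Int) :=
  let terms := PySem.List.dedup query
  let k := terms.length
  let pos := terms.map (fun t => PySem.List.sorted (PySem.Dict.getD ⟨invertedFile⟩ t ([] : List Int)) (fun x => x))
  let lens := terms.map (fun t => PySem.Str.len t)
  let ne := (PySem.List.pyRange 0 (k : Int)).filter (fun i => PySem.List.pyGetD pos i [] ≠ [])
  (PySem.List.pyRange 0 (k : Int)).map (fun i =>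
    let row := List.replicate k (15000 : Int)
    let row := PySem.List.pySetD row i 0
    if PySem.List.pyGetD pos i [] ≠ [] then
      let pi := PySem.List.pyGetD pos i []
      let ci := PySem.List.pyGetD lens i 0
      ne.foldl (fun row j =>
        if j ≠ i then
          PySem.List.pySetD row j
            (tpLoop pi (PySem.List.pyGetD pos j []) ci (PySem.List.pyGetD lens j 0) 15000)
        else row) row
    else row)

-- ===== PRECONDITION & SPEC =====
def Spec_matrixDist (query : List String) (invertedFile : List (String × List Int)) (out : List (List Int)) : Prop := out = matrixDist_alt query invertedFile
instance (query : List String) (invertedFile : List (String × List Int)) (out : List (List Int)) : Decidable (Spec_matrixDist query invertedFile out) := by unfold Spec_matrixDist; infer_instance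

-- ===== CLAIM (what is proved, stated in full; the proofs are below) =====
def Claim_equal_matrixDist : Prop := ∀ (query : List String) (invertedFile : List (String × List Int)), Dom_matrixDist query invertedFile → Spec_matrixDist query invertedFile (matrixDist query invertedFile)

-- ===== LEMMAS AND PROOFS =====

-- the value A's comparison contributes for the pair of positions (a, b)
def pvF (c1 c2 a b : Int) : Int := if a < b then b - a - c1 else a - b - c2

-- all pair values, row by row
def pvPairs (c1 c2 : Int) (L1 L2 : List Int) : List Int :=
  L1.flatMap (fun a => L2.map (pvF c1 c2 a))

theorem pvStep_eq_min (c1 c2 a b m : Int) :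
    (if a < b then
      if b - (a + c1) < m then b - (a + c1) else m
     else
      if a - (b + c2) < m then a - (b + c2) else m) = min m (pvF c1 c2 a b) := by
  unfold pvF; split_ifs <;> omega

theorem foldl_min_absorb (l : List Int) (j : Int) (h : ∀ x ∈ l, j ≤ x) :
    l.foldl min j = j := by
  induction l with
  | nil => rfl
  | cons x xs ih =>
    simp only [List.foldl_cons]
    rw [min_eq_left (h x (by simp))]
    exact ih (fun y hy => h y (by simp [hy]))

theorem pairs_cons_left (c1 c2 : Int) (a : Int) (as L2 : List Int) :
    pvPairs c1 c2 (a :: as) L2 = L2.map (pvF c1 c2 a) ++ pvPairs c1 c2 as L2 := by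
  simp [pvPairs]

theorem flatMap_cons_perm {α : Type} (l : List α) (g : α → Int) (h : α → List Int) :
    (l.flatMap (fun x => g x :: h x)).Perm (l.map g ++ l.flatMap h) := by
  induction l with
  | nil => simp
  | cons x xs ih =>
    simp only [List.flatMap_cons, List.map_cons, List.cons_append]
    refine List.Perm.cons _ ?_
    have h1 : (h x ++ xs.flatMap (fun y => g y :: h y)).Perm (h x ++ (xs.map g ++ xs.flatMap h)) :=
      List.Perm.append_left _ ih
    have h2 : (h x ++ (xs.map g ++ xs.flatMap h)).Perm (xs.map g ++ (h x ++ xs.flatMap h)) := by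
      rw [← List.append_assoc, ← List.append_assoc]
      exact List.Perm.append_right _ List.perm_append_comm
    exact h1.trans h2

theorem pairs_cons_right_perm (c1 c2 : Int) (L1 : List Int) (b : Int) (bs : List Int) :
    (pvPairs c1 c2 L1 (b :: bs)).Perm
      (L1.map (fun x => pvF c1 c2 x b) ++ pvPairs c1 c2 L1 bs) := by
  unfold pvPairs
  simpa using flatMap_cons_perm L1 (fun x => pvF c1 c2 x b) (fun x => bs.map (pvF c1 c2 x))

theorem pvPairs_nil_right (c1 c2 : Int) (L1 : List Int) : pvPairs c1 c2 L1 [] = [] := by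
  unfold pvPairs; induction L1 <;> simp_all

theorem pvPairs_perm (c1 c2 : Int) {L1 L1' L2 L2' : List Int}
    (h1 : L1.Perm L1') (h2 : L2.Perm L2') :
    (pvPairs c1 c2 L1 L2).Perm (pvPairs c1 c2 L1' L2') := by
  unfold pvPairs
  exact (List.Perm.flatMap_right _ h1).trans
    (List.Perm.flatMap_left L1' (fun a _ => h2.map (pvF c1 c2 a)))

-- B's two-pointer merge computes the minimum over ALL pairs when both lists are ascending
theorem tpLoop_eq_pairs_min (c1 c2 : Int) (n : Nat) :
    ∀ (p1 p2 : List Int), p1.length + p2.length ≤ n →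
      p1.Pairwise (· ≤ ·) → p2.Pairwise (· ≤ ·) → ∀ (init : Int),
      tpLoop p1 p2 c1 c2 init = (pvPairs c1 c2 p1 p2).foldl min init := by
  induction n with
  | zero =>
    intro p1 p2 hlen _ _ init
    have h1 : p1 = [] := by cases p1 <;> simp_all
    subst h1; simp [tpLoop, pvPairs]
  | succ n ih =>
    intro p1 p2 hlen hc1 hc2 init
    match p1, p2 with
    | [], p2 => simp [tpLoop, pvPairs]
    | a :: as, [] =>
      have hfm : (List.flatMap (fun (_ : Int) => ([] : List Int)) as) = [] := by
        induction as <;> simp_all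
      simp [tpLoop, pvPairs, hfm]
    | a :: as, b :: bs =>
      rw [tpLoop]
      by_cases hab : a < b
      · rw [if_pos hab]
        have hstep : (if b - a - c1 < init then b - a - c1 else init) = min init (pvF c1 c2 a b) := by
          unfold pvF; split_ifs <;> omega
        rw [hstep, ih as (b :: bs) (by simp at hlen ⊢; omega) hc1.tail hc2]
        rw [pairs_cons_left, List.foldl_append]
        congr 1
        simp only [List.map_cons, List.foldl_cons]
        symm
        apply foldl_min_absorb
        intro x hx
        obtain ⟨y, hy, rfl⟩ := List.mem_map.mp hx
        have hby : b ≤ y := (List.pairwise_cons.mp hc2).1 y hy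
        have h1 : pvF c1 c2 a b ≤ pvF c1 c2 a y := by
          unfold pvF; split_ifs <;> omega
        exact le_trans (min_le_right _ _) h1
      · rw [if_neg hab]
        have hstep : (if a - b - c2 < init then a - b - c2 else init) = min init (pvF c1 c2 a b) := by
          unfold pvF; split_ifs <;> omega
        rw [hstep, ih (a :: as) bs (by simp at hlen ⊢; omega) hc1 hc2.tail]
        rw [(pairs_cons_right_perm c1 c2 (a :: as) b bs).foldl_eq init, List.foldl_append]
        congr 1
        simp only [List.map_cons, List.foldl_cons]
        symm
        apply foldl_min_absorb
        intro x hx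
        obtain ⟨y, hy, rfl⟩ := List.mem_map.mp hx
        have hay : a ≤ y := (List.pairwise_cons.mp hc1).1 y hy
        have h1 : pvF c1 c2 a b ≤ pvF c1 c2 y b := by
          unfold pvF; split_ifs <;> omega
        exact le_trans (min_le_right _ _) h1

-- A's nested index loop, as a min-fold over all pair values
theorem afold_eq_pairs_min (c1 c2 : Int) (L1 L2 : List Int) (init : Int) :
    L1.foldl (fun m a => L2.foldl (fun m b =>
        if a < b then
          if b - (a + c1) < m then b - (a + c1) else m
        else
          if a - (b + c2) < m then a - (b + c2) else m) m) init
      = (pvPairs c1 c2 L1 L2).foldl min init := by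
  induction L1 generalizing init with
  | nil => rfl
  | cons a as ih =>
    simp only [List.foldl_cons, pvPairs, List.flatMap_cons, List.foldl_append, ih]
    congr 1
    simp only [pvStep_eq_min, List.foldl_map]

theorem nested_pyfold (xs ys : List Int) (g : Int → Int → Int → Int) (init : Int) :
    (PySem.List.pyRange 0 (xs.length : Int)).foldl (fun acc i =>
      (PySem.List.pyRange 0 (ys.length : Int)).foldl (fun acc j =>
        g acc (PySem.List.pyGetD xs i 0) (PySem.List.pyGetD ys j 0)) acc) init
    = xs.foldl (fun acc a => ys.foldl (fun acc b => g acc a b) acc) init := by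
  simp only [PySem.List.foldl_pyRange_zero_pyGetD']
  rw [PySem.List.foldl_pyRange_zero_pyGetD' xs 0 (fun acc v => List.foldl (fun acc b => g acc v b) acc ys) init]

theorem minDist_to_pairs (term1 term2 : String) (invertedFile : List (String × List Int)) :
    minDist term1 term2 invertedFile =
      (pvPairs (PySem.Str.len term1) (PySem.Str.len term2)
        (PySem.Dict.getD ⟨invertedFile⟩ term1 ([] : List Int))
        (PySem.Dict.getD ⟨invertedFile⟩ term2 ([] : List Int))).foldl min 15000 := by
  unfold minDist
  set L1 := PySem.Dict.getD ⟨invertedFile⟩ term1 ([] : List Int) with hL1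
  set L2 := PySem.Dict.getD ⟨invertedFile⟩ term2 ([] : List Int) with hL2
  by_cases h1 : L1.length = 0
  · rw [if_pos h1]
    rw [List.length_eq_zero_iff.mp h1]
    rfl
  · rw [if_neg h1]
    by_cases h2 : L2.length = 0
    · rw [if_pos h2, List.length_eq_zero_iff.mp h2, pvPairs_nil_right]
      rfl
    · rw [if_neg h2]
      exact (nested_pyfold L1 L2 (fun m a b =>
        if a < b then
          if b - (a + PySem.Str.len term1) < m then b - (a + PySem.Str.len term1) else m
        else
          if a - (b + PySem.Str.len term2) < m then a - (b + PySem.Str.len term2) else m) 15000).trans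
        (afold_eq_pairs_min (PySem.Str.len term1) (PySem.Str.len term2) L1 L2 15000)

theorem tp_sorted_eq_pairs (c1 c2 : Int) (L1 L2 : List Int) :
    tpLoop (PySem.List.sorted L1 (fun x => x)) (PySem.List.sorted L2 (fun x => x)) c1 c2 15000
      = (pvPairs c1 c2 L1 L2).foldl min 15000 := by
  have hs1 := PySem.List.sorted_pairwise L1 (fun x => x)
  have hs2 := PySem.List.sorted_pairwise L2 (fun x => x)
  rw [tpLoop_eq_pairs_min c1 c2
    ((PySem.List.sorted L1 (fun x => x)).length + (PySem.List.sorted L2 (fun x => x)).length)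
    _ _ le_rfl hs1 hs2 15000]
  exact (pvPairs_perm _ _ (PySem.List.sorted_perm L1 (fun x => x) false)
    (PySem.List.sorted_perm L2 (fun x => x) false)).foldl_eq 15000

-- per-cell equality: A's pair scan = B's merge of the sorted lists
theorem cell_eq (term1 term2 : String) (invertedFile : List (String × List Int)) :
    minDist term1 term2 invertedFile
      = tpLoop (PySem.List.sorted (PySem.Dict.getD ⟨invertedFile⟩ term1 ([] : List Int)) (fun x => x))
          (PySem.List.sorted (PySem.Dict.getD ⟨invertedFile⟩ term2 ([] : List Int)) (fun x => x))
          (PySem.Str.len term1) (PySem.Str.len term2) 15000 :=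
  (minDist_to_pairs term1 term2 invertedFile).trans (tp_sorted_eq_pairs _ _ _ _).symm

theorem removeDuplicates_eq_dedup (query : List String) :
    removeDuplicates query = PySem.List.dedup query := by
  rw [PySem.List.dedup_eq_ofList, PySem.Set.ofList_eq_foldl, removeDuplicates]
  suffices h : ∀ acc : List String, query.foldl (fun result q => if q ∈ result then result else result ++ [q]) acc = query.foldl PySem.Set.add acc from h []
  induction query with
  | nil => intro acc; rfl
  | cons x xs ih =>
    intro acc
    simp only [List.foldl_cons, ih]
    congr 1
    simp [PySem.Set.add, PySem.Set.contains]

-- A's inner loop fills row i in place: it equals one set of row i to the folded row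
theorem innerRow (v : Nat → Int) (i : Nat) :
    ∀ (n : Nat) (m : List (List Int)), i < m.length →
      (List.range n).foldl (fun m j => if i ≠ j then m.set i ((m.getD i []).set j (v j)) else m) m
      = m.set i ((List.range n).foldl (fun r j => if i ≠ j then r.set j (v j) else r) (m.getD i [])) := by
  intro n
  induction n with
  | zero =>
    intro m hi
    simp only [List.range_zero, List.foldl_nil]
    rw [List.getD_eq_getElem m [] hi, List.set_getElem_self]
  | succ n ih =>
    intro m hi
    rw [List.range_succ, List.foldl_append, List.foldl_append, ih m hi]
    simp only [List.foldl_cons, List.foldl_nil]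
    by_cases hin : i ≠ n
    · rw [if_pos hin, if_pos hin]
      have hlen : i < (m.set i ((List.range n).foldl (fun r j => if i ≠ j then r.set j (v j) else r) (m.getD i []))).length := by
        simpa using hi
      rw [List.getD_eq_getElem _ [] hlen, List.getElem_set_self, List.set_set]
    · rw [if_neg hin, if_neg hin]

-- successive sets on the zero row, characterised entrywise
theorem rowChar (v : Nat → Int) (i k : Nat) :
    ∀ (n : Nat), n ≤ k →
      (List.range n).foldl (fun r j => if i ≠ j then r.set j (v j) else r)
          ((List.range k).map (fun _ => (0 : Int)))
      = (List.range k).map (fun j => if j < n ∧ i ≠ j then v j else 0) := by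
  intro n
  induction n with
  | zero =>
    intro _
    simp
  | succ n ih =>
    intro hn
    rw [List.range_succ, List.foldl_append, ih (by omega)]
    simp only [List.foldl_cons, List.foldl_nil]
    by_cases hin : i ≠ n
    · rw [if_pos hin]
      apply List.ext_getElem (by simp [List.length_set])
      intro t h1 h2
      simp only [List.length_set, List.length_map, List.length_range] at h1 h2 ⊢
      rw [List.getElem_set]
      simp only [List.getElem_map, List.getElem_range]
      by_cases htn : n = t
      · subst htn; simp [hin]
      · simp only [if_neg htn]
        have : (t < n ∧ i ≠ t) ↔ (t < n + 1 ∧ i ≠ t) := by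
          constructor
          · rintro ⟨h3, h4⟩; exact ⟨by omega, h4⟩
          · rintro ⟨h3, h4⟩; exact ⟨by omega, h4⟩
        split_ifs with hA hB hB <;> first | rfl | (exfalso; omega)
    · rw [if_neg hin]
      apply List.map_congr_left
      intro a ha
      have hia : i = n := by omega
      subst hia
      by_cases hlt : a < i <;> by_cases hne : i ≠ a <;> simp_all <;> omega

-- the outer loop, row by row
theorem outerM (v : Nat → Nat → Int) (k : Nat) :
    ∀ (p : Nat), p ≤ k →
      (List.range p).foldl (fun m i =>
        (List.range k).foldl (fun m j =>
          if i ≠ j then m.set i ((m.getD i []).set j (v i j)) else m) m)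
        ((List.range k).map (fun _ => (List.range k).map (fun _ => (0 : Int))))
      = (List.range k).map (fun i => if i < p then
          (List.range k).map (fun j => if i = j then 0 else v i j)
        else (List.range k).map (fun _ => (0 : Int))) := by
  intro p
  induction p with
  | zero =>
    intro _
    simp
  | succ p ih =>
    intro hp
    rw [List.range_succ, List.foldl_append, ih (by omega)]
    simp only [List.foldl_cons, List.foldl_nil]
    set M := (List.range k).map (fun i => if i < p then
          (List.range k).map (fun j => if i = j then 0 else v i j)
        else (List.range k).map (fun _ => (0 : Int))) with hM
    have hMlen : M.length = k := by simp [hM]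
    have hpk : p < M.length := by omega
    rw [innerRow (fun j => v p j) p k M hpk]
    have hMp : M.getD p [] = (List.range k).map (fun _ => (0 : Int)) := by
      rw [List.getD_eq_getElem M [] hpk]
      simp [hM, List.getElem_map]
    rw [hMp, rowChar (fun j => v p j) p k k le_rfl]
    apply List.ext_getElem (by simp [hM])
    intro t h1 h2
    simp only [List.length_set] at h1
    rw [List.getElem_set]
    simp only [hM, List.getElem_map, List.getElem_range]
    simp only [List.length_map, List.length_range] at h2
    by_cases hpt : p = t
    · subst hpt
      simp only [if_pos (by omega : p < p + 1)]
      apply List.map_congr_left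
      intro a ha
      have hak : a < k := List.mem_range.mp ha
      by_cases hpa : p = a
      · subst hpa; simp
      · simp [hpa, hak]
    · rw [if_neg hpt]
      have : (t < p) ↔ (t < p + 1) := by omega
      split_ifs <;> first | rfl | (exfalso; omega)

-- A's matrix construction, with python indexing removed
theorem matrixA_reduce (q : List String) (w : String → String → Int) :
    (let matrix := (PySem.List.pyRange 0 (q.length : Int)).map
        (fun _ => (PySem.List.pyRange 0 (q.length : Int)).map (fun _ => (0 : Int)))
     let l1 := PySem.List.pyRange 0 (q.length : Int)
     l1.foldl (fun matrix i =>
       l1.foldl (fun matrix j =>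
         if i ≠ j then
           PySem.List.pySetD matrix i
             (PySem.List.pySetD (PySem.List.pyGetD matrix i []) j
               (w (PySem.List.pyGetD q i "") (PySem.List.pyGetD q j "")))
         else matrix) matrix) matrix)
    = (List.range q.length).foldl (fun m i =>
        (List.range q.length).foldl (fun m j =>
          if i ≠ j then m.set i ((m.getD i []).set j (w (q.getD i "") (q.getD j ""))) else m) m)
        ((List.range q.length).map (fun _ => (List.range q.length).map (fun _ => (0 : Int)))) := by
  simp only [PySem.List.pyRange_zero_nat, List.foldl_map, List.map_map, Function.comp_def,
    PySem.List.pySetD_natCast, PySem.List.pyGetD_natCast, ne_eq, Nat.cast_inj]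

theorem tpLoop_nil_left (p2 : List Int) (c1 c2 best : Int) : tpLoop [] p2 c1 c2 best = best := by
  cases p2 <;> simp [tpLoop]

theorem tpLoop_nil_right (p1 : List Int) (c1 c2 best : Int) : tpLoop p1 [] c1 c2 best = best := by
  cases p1 <;> simp [tpLoop]

theorem length_foldl_sets (i : Nat) (w : Nat → Int) (js : List Nat) :
    ∀ (r0 : List Int),
      (js.foldl (fun r j => if j ≠ i then r.set j (w j) else r) r0).length = r0.length := by
  induction js with
  | nil => intro r0; rfl
  | cons j js ih =>
    intro r0
    simp only [List.foldl_cons]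
    rw [ih]
    split_ifs <;> simp

theorem foldl_sets_getD (i : Nat) (w : Nat → Int) :
    ∀ (js : List Nat) (r0 : List Int) (t : Nat), t < r0.length →
      ((js.foldl (fun r j => if j ≠ i then r.set j (w j) else r) r0).getD t 0)
      = if t ∈ js ∧ t ≠ i then w t else r0.getD t 0 := by
  intro js
  induction js with
  | nil => intro r0 t ht; simp
  | cons j js ih =>
    intro r0 t ht
    simp only [List.foldl_cons]
    have hlen : t < (if j ≠ i then r0.set j (w j) else r0).length := by
      by_cases hji : j ≠ i
      · rw [if_pos hji]; simpa using ht
      · rw [if_neg hji]; exact ht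
    rw [ih _ t hlen]
    have hbase : (if j ≠ i then r0.set j (w j) else r0).getD t 0
        = if t = j ∧ j ≠ i then w j else r0.getD t 0 := by
      by_cases hji : j ≠ i
      · rw [if_pos hji, List.getD_eq_getElem _ _ (by simpa using ht), List.getElem_set,
          List.getD_eq_getElem _ _ ht]
        by_cases htj : t = j
        · rw [if_pos (htj ▸ rfl), if_pos ⟨htj, hji⟩]
        · rw [if_neg (fun h => htj h.symm), if_neg (fun h => htj h.1)]
      · rw [if_neg hji, if_neg (fun h => hji h.2)]
    rw [hbase]
    by_cases hmem : t ∈ js ∧ t ≠ i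
    · rw [if_pos hmem, if_pos ⟨List.mem_cons_of_mem j hmem.1, hmem.2⟩]
    · rw [if_neg hmem]
      by_cases htji : t = j ∧ j ≠ i
      · rw [if_pos htji, if_pos ⟨List.mem_cons.mpr (Or.inl htji.1), htji.1 ▸ htji.2⟩, htji.1]
      · rw [if_neg htji]
        have : ¬(t ∈ j :: js ∧ t ≠ i) := by
          rintro ⟨hm, hne⟩
          rcases List.mem_cons.mp hm with h | h
          · exact htji ⟨h, h ▸ hne⟩
          · exact hmem ⟨h, hne⟩
        rw [if_neg this]

theorem matrixB_reduce (query : List String) (invertedFile : List (String × List Int)) :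
    matrixDist_alt query invertedFile
    = (List.range (PySem.List.dedup query).length).map (fun i =>
        (List.range (PySem.List.dedup query).length).map (fun j =>
          if i = j then 0
          else tpLoop
            (PySem.List.sorted (PySem.Dict.getD ⟨invertedFile⟩ ((PySem.List.dedup query).getD i "") ([] : List Int)) (fun x => x))
            (PySem.List.sorted (PySem.Dict.getD ⟨invertedFile⟩ ((PySem.List.dedup query).getD j "") ([] : List Int)) (fun x => x))
            (PySem.Str.len ((PySem.List.dedup query).getD i ""))
            (PySem.Str.len ((PySem.List.dedup query).getD j "")) 15000)) := by
  unfold matrixDist_alt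
  set terms := PySem.List.dedup query with hterms
  set k := terms.length with hk
  set pos := terms.map (fun t => PySem.List.sorted (PySem.Dict.getD ⟨invertedFile⟩ t ([] : List Int)) (fun x => x)) with hpos
  set lens := terms.map (fun t => PySem.Str.len t) with hlens
  have hposlen : pos.length = k := by rw [hpos, List.length_map, hk]
  have hlenslen : lens.length = k := by rw [hlens, List.length_map, hk]
  have hne : (PySem.List.pyRange 0 (k : Int)).filter (fun i => PySem.List.pyGetD pos i [] ≠ [])
      = ((List.range k).filter (fun t => pos.getD t [] ≠ [])).map (fun t : Nat => (t : Int)) := by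
    rw [PySem.List.pyRange_zero_nat, List.filter_map]
    simp only [Function.comp_def, PySem.List.pyGetD_natCast]
  dsimp only
  rw [hne, PySem.List.pyRange_zero_nat, List.map_map]
  apply List.map_congr_left
  intro i hi
  have hik : i < k := List.mem_range.mp hi
  simp only [Function.comp_def, PySem.List.pyGetD_natCast, PySem.List.pySetD_natCast,
    List.foldl_map, ne_eq, Nat.cast_inj]
  have hgetmap : ∀ (t : Nat), t < k → ∀ (f : String → List Int),
      (terms.map f).getD t [] = f (terms.getD t "") := by
    intro t ht f
    rw [List.getD_eq_getElem _ _ (by simpa using ht), List.getElem_map,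
      List.getD_eq_getElem _ _ ht]
  have hlenmap : ∀ (t : Nat), t < k →
      lens.getD t 0 = PySem.Str.len (terms.getD t "") := by
    intro t ht
    rw [hlens, List.getD_eq_getElem _ _ (by simpa using ht), List.getElem_map,
      List.getD_eq_getElem _ _ ht]
  by_cases hPi : pos.getD i [] ≠ []
  · rw [if_pos hPi]
    apply List.ext_getElem
    · rw [length_foldl_sets]
      simp [hk]
    intro t h1 h2
    rw [length_foldl_sets, List.length_set, List.length_replicate] at h1
    have hbase : t < ((List.replicate k (15000 : Int)).set i 0).length := by simpa using h1
    rw [← List.getD_eq_getElem _ 0 (by rw [length_foldl_sets]; simpa using hbase)]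
    rw [foldl_sets_getD i _ _ _ t hbase]
    simp only [List.getElem_map, List.getElem_range]
    rw [List.getD_eq_getElem _ _ hbase, List.getElem_set]
    split_ifs with hmem hit hit
    · exact (hmem.2 hit.symm).elim
    · rw [hgetmap i hik, hgetmap t h1, hlenmap i hik, hlenmap t h1]
    · rfl
    · rw [List.getElem_replicate]
      have hPt : pos.getD t [] = [] := by
        by_contra hne0
        exact hmem ⟨List.mem_filter.mpr ⟨List.mem_range.mpr h1, by simpa using hne0⟩,
          fun h => hit h.symm⟩
      rw [hgetmap t h1] at hPt
      rw [hPt, tpLoop_nil_right]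
  · rw [if_neg hPi]
    simp only [ne_eq, not_not] at hPi
    apply List.ext_getElem
    · simp [hk]
    intro t h1 h2
    rw [List.length_set, List.length_replicate] at h1
    simp only [List.getElem_map, List.getElem_range]
    rw [hgetmap i hik] at hPi
    rw [List.getElem_set]
    split_ifs with hit
    · rfl
    · rw [List.getElem_replicate, hPi, tpLoop_nil_left]

theorem matrixDist_eq_alt (query : List String) (invertedFile : List (String × List Int)) :
    matrixDist query invertedFile = matrixDist_alt query invertedFile := by
  have hA : matrixDist query invertedFile
      = (List.range (removeDuplicates query).length).foldl (fun m i =>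
          (List.range (removeDuplicates query).length).foldl (fun m j =>
            if i ≠ j then m.set i ((m.getD i []).set j
              (minDist ((removeDuplicates query).getD i "") ((removeDuplicates query).getD j "") invertedFile)) else m) m)
          ((List.range (removeDuplicates query).length).map
            (fun _ => (List.range (removeDuplicates query).length).map (fun _ => (0 : Int)))) := by
    unfold matrixDist
    exact matrixA_reduce (removeDuplicates query) (fun s t => minDist s t invertedFile)
  rw [hA, outerM (fun i j =>
      minDist ((removeDuplicates query).getD i "") ((removeDuplicates query).getD j "") invertedFile)
      (removeDuplicates query).length (removeDuplicates query).length le_rfl]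
  rw [matrixB_reduce query invertedFile, removeDuplicates_eq_dedup]
  apply List.map_congr_left
  intro i hi
  rw [if_pos (List.mem_range.mp hi)]
  apply List.map_congr_left
  intro j _
  by_cases hij : i = j
  · simp [hij]
  · rw [if_neg hij, if_neg hij, cell_eq]

-- ===== VERDICT (by name: the statement is the Claim_ definition above) =====
theorem matrixDist_spec : Claim_equal_matrixDist := by
  intro query invertedFile _
  unfold Spec_matrixDist
  exact matrixDist_eq_alt query invertedFile
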